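-- pv_equiv track=rewrite | github.com/raincomplex/randomizers | randos/seamless.py | seamless_bag3_pure
-- ===== SOURCE A (Python) =====
-- def seamless_bag3_pure(history):
--     'seamless 21-piece bag'
--     bag = list('jiltsoz'*3)
--     for c in history[-21:]:
--         if c in bag:
--             bag.remove(c)
--     if not bag:
--         bag = list('jiltsoz')
--     return {c: bag.count(c) for c in 'jiltsoz'}
-- ===== SOURCE B (Python) =====
-- def seamless_bag3_pure(history):
--     'seamless 21-piece bag'
--     tail = history[-21:]
--     rem = {c: max(0, 3 - tail.count(c)) for c in 'jiltsoz'}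
--     if all(v == 0 for v in rem.values()):
--         return {c: 1 for c in 'jiltsoz'}
--     return rem
-- ===== Notes on version B (the rewrite author's own statement) =====
-- stated objective: simpler
-- what changed: Replaces the 21-piece bag list and per-item membership-test-and-remove simulation with a direct count of each piece in the last 21 history items, clamped at 0 via max(0, 3 - count), followed by the same all-zero reset to ones.
import Mathlib
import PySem

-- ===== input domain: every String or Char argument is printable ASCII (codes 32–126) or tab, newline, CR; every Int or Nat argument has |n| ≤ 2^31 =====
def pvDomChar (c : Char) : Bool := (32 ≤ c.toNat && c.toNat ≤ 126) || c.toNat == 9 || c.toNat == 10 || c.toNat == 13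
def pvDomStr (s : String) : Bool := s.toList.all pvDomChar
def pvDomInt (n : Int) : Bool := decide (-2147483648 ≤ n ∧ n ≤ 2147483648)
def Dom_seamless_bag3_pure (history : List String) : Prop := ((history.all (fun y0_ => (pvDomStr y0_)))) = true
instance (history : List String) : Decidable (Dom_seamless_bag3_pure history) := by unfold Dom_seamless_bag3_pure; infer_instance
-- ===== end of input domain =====

-- B replaces A's draw-and-remove bag simulation by a direct count-and-clamp formula per piece (objective: simpler).

-- ===== PORT A =====
-- list('jiltsoz')
def pvPieces : List String := ["j", "i", "l", "t", "s", "o", "z"]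

-- loop body: `if c in bag: bag.remove(c)`
def pvStepA (bag : List String) (c : String) : List String :=
  if bag.contains c then (PySem.List.remove? bag c).getD bag else bag

def seamless_bag3_pure (history : List String) : List (String × Int) :=
  let bag0 := pvPieces ++ pvPieces ++ pvPieces        -- list('jiltsoz'*3)
  let bag := (PySem.List.slice history (some (-21)) none).foldl pvStepA bag0
  let bag := if bag = [] then pvPieces else bag
  pvPieces.map (fun c => (c, (bag.count c : Int)))    -- {c: bag.count(c) for c in 'jiltsoz'}

-- ===== PORT B =====
def seamless_bag3_pure_alt (history : List String) : List (String × Int) :=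
  let tail := PySem.List.slice history (some (-21)) none
  let rem := pvPieces.map (fun c => (c, max 0 (3 - (tail.count c : Int))))
  if rem.all (fun p => p.2 == 0) then pvPieces.map (fun c => (c, (1 : Int))) else rem

-- ===== PRECONDITION & SPEC =====
def Spec_seamless_bag3_pure (history : List String) (out : List (String × Int)) : Prop := out = seamless_bag3_pure_alt history
instance (history : List String) (out : List (String × Int)) : Decidable (Spec_seamless_bag3_pure history out) := by unfold Spec_seamless_bag3_pure; infer_instance

-- ===== CLAIM (what is proved, stated in full; the proofs are below) =====
def Claim_equal_seamless_bag3_pure : Prop := ∀ (history : List String), Dom_seamless_bag3_pure history → Spec_seamless_bag3_pure history (seamless_bag3_pure history)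

-- ===== LEMMAS AND PROOFS =====

-- one removal step changes the count of c by (at most) one when the drawn element is c
theorem pvStepA_count (bag : List String) (x c : String) :
    (pvStepA bag x).count c = bag.count c - (if x = c then 1 else 0) := by
  unfold pvStepA
  by_cases hx : bag.contains x
  · simp only [hx, if_true]
    rw [PySem.List.remove?_eq_some_erase bag x (by simpa using hx)]
    simp only [Option.getD_some]
    by_cases hxc : x = c
    · subst hxc
      simp [List.count_erase_self]
    · simp [List.count_erase_of_ne (by simpa using (Ne.symm hxc)), hxc]
  · simp only [hx]
    by_cases hxc : x = c
    · subst hxc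
      have : bag.count x = 0 := by
        simpa using List.count_eq_zero.mpr (by simpa using hx)
      simp [this]
    · simp [hxc]

-- count of c in the bag after simulating all draws
theorem pvFold_count (xs : List String) (bag : List String) (c : String) :
    (xs.foldl pvStepA bag).count c = bag.count c - xs.count c := by
  induction xs generalizing bag with
  | nil => simp
  | cons x xs ih =>
      rw [List.foldl_cons, ih, pvStepA_count, List.count_cons]
      by_cases hxc : x = c <;> simp [hxc] <;> omega
  
-- the simulated bag only shrinks: its members come from the initial bag
theorem pvFold_subset (xs : List String) (bag : List String) (x : String)
    (h : x ∈ xs.foldl pvStepA bag) : x ∈ bag := by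
  induction xs generalizing bag with
  | nil => simpa using h
  | cons y ys ih =>
      rw [List.foldl_cons] at h
      have hx : x ∈ pvStepA bag y := ih _ h
      unfold pvStepA at hx
      by_cases hy : bag.contains y
      · rw [if_pos hy, PySem.List.remove?_eq_some_erase bag y (by simpa using hy)] at hx
        exact List.mem_of_mem_erase (by simpa using hx)
      · rw [if_neg hy] at hx; exact hx

theorem seamless_bag3_pure_spec : Claim_equal_seamless_bag3_pure := by
  unfold Claim_equal_seamless_bag3_pure
  intro history _
  simp only [Spec_seamless_bag3_pure, seamless_bag3_pure, seamless_bag3_pure_alt]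
  set tail := PySem.List.slice history (some (-21)) none with htail
  set bagF := tail.foldl pvStepA (pvPieces ++ pvPieces ++ pvPieces) with hbagF
  have hcount : ∀ c, bagF.count c = (pvPieces ++ pvPieces ++ pvPieces).count c - tail.count c :=
    fun c => pvFold_count tail _ c
  -- the two branch conditions agree
  have hcond : (bagF = []) ↔
      ((pvPieces.map (fun c => (c, max 0 (3 - (tail.count c : Int))))).all (fun p => p.2 == 0) = true) := by
    constructor
    · intro hnil
      simp only [List.all_map, List.all_eq_true]
      intro c hc
      have h3 : (pvPieces ++ pvPieces ++ pvPieces).count c = 3 := by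
        simp [pvPieces] at hc
        rcases hc with rfl | rfl | rfl | rfl | rfl | rfl | rfl <;> decide
      have h0 : bagF.count c = 0 := by rw [hnil]; simp
      rw [hcount c, h3] at h0
      simp only [Function.comp, beq_iff_eq]
      omega
    · intro hall
      simp only [List.all_map, List.all_eq_true, Function.comp, beq_iff_eq] at hall
      rw [List.eq_nil_iff_forall_not_mem]
      intro x hx
      have hx0 : x ∈ pvPieces := by
        have := pvFold_subset tail _ x hx
        simp only [List.mem_append] at this
        tauto
      have h3 : (pvPieces ++ pvPieces ++ pvPieces).count x = 3 := by
        simp [pvPieces] at hx0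
        rcases hx0 with rfl | rfl | rfl | rfl | rfl | rfl | rfl <;> decide
      have hocc := hall x hx0
      have hpos : 0 < bagF.count x := List.count_pos_iff.mpr hx
      rw [hcount x, h3] at hpos
      omega
  by_cases hnil : bagF = []
  · rw [if_pos hnil, if_pos (hcond.mp hnil)]
    decide
  · rw [if_neg hnil, if_neg (by intro h; exact hnil (hcond.mpr h))]
    apply List.map_congr_left
    intro c hc
    have h3 : (pvPieces ++ pvPieces ++ pvPieces).count c = 3 := by
      simp [pvPieces] at hc
      rcases hc with rfl | rfl | rfl | rfl | rfl | rfl | rfl <;> decide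
    have h := hcount c
    rw [h3] at h
    refine Prod.ext rfl ?_
    simp only
    omega
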